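-- pv_equiv track=rewrite | github.com/jcausse/clases_uca_ig | unidad_6/ej10.py | atributoTriple
-- ===== SOURCE A (Python) =====
-- def atributoTriple(lst):
--     ultimo_numero = None        # Ultimo numero encontrado
--     cantidad_repeticiones = 0   # Cantidad de veces que se repitio ese ultimo numero
--     triples = 0                 # Cantidad de triples que encontre hasta ahora
--
--     i = 0
--     while i < len(lst) and triples < 3:         # Recorro la lista hasta el final, o hasta que el numero de triples sea 3
--                                                 # Esto es porque, el mensaje a retornar para 3 o mas triples es siempre el mismo, por
--                                                 # lo que, encontrados 3 triples, no tiene sentido seguir buscando.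
--
--         n = lst[i]                              # Saco el siguiente numero de la lista
--         if n == ultimo_numero:                  # Si coincide con el anterior
--             cantidad_repeticiones += 1          # Aumento el numero de repeticiones
--             if cantidad_repeticiones == 3:      # Y si llego a 3
--                 ultimo_numero = None            # Reseteo las variables para arrancar de nuevo a buscar el proximo triple
--                 cantidad_repeticiones = 0
--                 triples += 1                    # Anoto que hubo un triple mas
--
--         else:                                   # Si el nuevo numero no coincide con el anterior
--             ultimo_numero = n                   # Cambia el ultimo numero
--             cantidad_repeticiones = 1           # La cantidad de repeticiones se hace 1, pues el actual cuenta para el posible triple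
--
--         i += 1
--
--     if triples == 0:
--         res = 'NADA'
--     elif triples == 1:
--         res = 'Un Triple'
--     elif triples == 2:
--         res = 'Dos Triples'
--     elif triples >= 3:
--         res = '+ Triples'
--
--     return res
-- ===== SOURCE B (Python) =====
-- def atributoTriple(lst):
--     # Measure each maximal run of equal elements; a run of length L yields L // 3 triples.
--     total = 0
--     i = 0
--     n = len(lst)
--     while i < n:
--         j = i + 1
--         while j < n and lst[j] == lst[i]:
--             j += 1
--         total += (j - i) // 3
--         i = j
--     if total == 0:
--         return 'NADA'
--     if total == 1:
--         return 'Un Triple'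
--     if total == 2:
--         return 'Dos Triples'
--     return '+ Triples'
-- ===== Notes on version B (the rewrite author's own statement) =====
-- stated objective: simpler
-- what changed: Replaces A's reset-based incremental state machine (last value, repetition counter, early exit at 3 triples) with a run-length scan: measure each maximal run of equal elements and sum length // 3, then map the total to the label.
import Mathlib
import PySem

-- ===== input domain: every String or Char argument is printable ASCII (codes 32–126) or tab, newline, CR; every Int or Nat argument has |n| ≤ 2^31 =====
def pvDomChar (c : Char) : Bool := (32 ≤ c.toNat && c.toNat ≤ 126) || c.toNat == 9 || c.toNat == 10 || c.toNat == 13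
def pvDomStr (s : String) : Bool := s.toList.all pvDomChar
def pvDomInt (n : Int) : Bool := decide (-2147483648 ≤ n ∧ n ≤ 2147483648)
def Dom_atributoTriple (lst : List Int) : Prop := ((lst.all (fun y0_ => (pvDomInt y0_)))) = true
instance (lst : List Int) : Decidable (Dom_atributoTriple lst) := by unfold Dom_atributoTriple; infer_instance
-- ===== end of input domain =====

-- B replaces A's reset-based incremental counter (with early exit) by a run-length scan summing L // 3 per maximal run; objective: simpler.


-- ===== PORT A =====
-- A's while loop: state (ultimo_numero, cantidad_repeticiones, triples), early exit once triples = 3.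
def atributoTripleLoop (l : List Int) (u : Option Int) (c : Int) (t : Int) : Int :=
  match l with
  | [] => t
  | n :: rest =>
    if t < 3 then
      if some n == u then
        if c + 1 == 3 then atributoTripleLoop rest none 0 (t + 1)
        else atributoTripleLoop rest u (c + 1) t
      else atributoTripleLoop rest (some n) 1 t
    else t

def atributoTriple (lst : List Int) : String :=
  let t := atributoTripleLoop lst none 0 0
  if t == 0 then "NADA"
  else if t == 1 then "Un Triple"
  else if t == 2 then "Dos Triples"
  else if 3 ≤ t then "+ Triples"
  else ""  -- unreachable (triples is always 0..3; Python's if-chain never falls through here)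

-- ===== PORT B =====
-- B's outer while loop: each step measures the maximal run starting at i (the inner while) and adds (j - i) // 3.
def atributoTripleAltCount (l : List Int) : Int :=
  match l with
  | [] => 0
  | x :: rest =>
    PySem.Int.floordiv (1 + (rest.takeWhile (· == x)).length) 3
      + atributoTripleAltCount (rest.dropWhile (· == x))
termination_by l.length
decreasing_by
  simp only [List.length_cons]
  exact Nat.lt_succ_of_le (List.length_dropWhile_le _ _)

def atributoTriple_alt (lst : List Int) : String :=
  let total := atributoTripleAltCount lst
  if total == 0 then "NADA"
  else if total == 1 then "Un Triple"
  else if total == 2 then "Dos Triples"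
  else "+ Triples"

-- ===== PRECONDITION & SPEC =====
def Spec_atributoTriple (lst : List Int) (out : String) : Prop := out = atributoTriple_alt lst
instance (lst : List Int) (out : String) : Decidable (Spec_atributoTriple lst out) := by unfold Spec_atributoTriple; infer_instance

-- ===== CLAIM (what is proved, stated in full; the proofs are below) =====
def Claim_equal_atributoTriple : Prop := ∀ (lst : List Int), Dom_atributoTriple lst → Spec_atributoTriple lst (atributoTriple lst)

-- ===== LEMMAS AND PROOFS =====

-- A's loop without the cap / early exit: the total number of triples found from state (u, c).
def gCount (l : List Int) (u : Option Int) (c : Int) : Int :=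
  match l with
  | [] => 0
  | n :: rest =>
    if some n == u then
      if c + 1 == 3 then 1 + gCount rest none 0
      else gCount rest u (c + 1)
    else gCount rest (some n) 1

theorem gCount_nonneg (l : List Int) (u : Option Int) (c : Int) : 0 ≤ gCount l u c := by
  induction l generalizing u c with
  | nil => simp [gCount]
  | cons n rest ih =>
    simp only [gCount]
    split
    · split
      · have := ih none 0; omega
      · exact ih _ _
    · exact ih _ _

-- A's loop computes the capped count.
theorem loop_eq_min (l : List Int) (u : Option Int) (c : Int) (t : Int)
    (ht0 : 0 ≤ t) (ht3 : t ≤ 3) :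
    atributoTripleLoop l u c t = min 3 (t + gCount l u c) := by
  induction l generalizing u c t with
  | nil => simp [atributoTripleLoop, gCount]; omega
  | cons n rest ih =>
    simp only [atributoTripleLoop, gCount]
    by_cases h3 : t < 3
    · simp only [h3, if_true]
      by_cases hu : (some n == u) = true
      · simp only [hu, if_true]
        by_cases hc : (c + 1 == 3) = true
        · simp only [hc, if_true]
          rw [ih none 0 (t + 1) (by omega) (by omega)]
          omega
        · simp only [hc]
          exact ih u (c + 1) t ht0 ht3
      · simp only [hu]
        exact ih (some n) 1 t ht0 ht3
    · simp only [h3, if_false]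
      have := gCount_nonneg (n :: rest) u c
      simp only [gCount] at this
      omega

-- Run decomposition of gCount for an in-run state (some x, c), 0 ≤ c < 3 (fuel = length bound).
theorem gCount_run : ∀ (fuel : Nat) (l : List Int), l.length ≤ fuel → ∀ (x c : Int), 0 ≤ c → c < 3 →
    gCount l (some x) c =
      PySem.Int.floordiv (c + (l.takeWhile (· == x)).length) 3
        + gCount (l.dropWhile (· == x)) none 0 := by
  intro fuel
  induction fuel with
  | zero =>
    intro l hl x c hc0 hc3
    have : l = [] := List.length_eq_zero_iff.mp (Nat.le_zero.mp hl)
    subst this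
    simp only [gCount, List.takeWhile_nil, List.dropWhile_nil, List.length_nil, Nat.cast_zero,
      add_zero]
    rw [PySem.Int.floordiv_eq_ediv_of_pos (by omega)]
    omega
  | succ n ih =>
    intro l hl x c hc0 hc3
    cases l with
    | nil =>
      simp only [gCount, List.takeWhile_nil, List.dropWhile_nil, List.length_nil, Nat.cast_zero,
        add_zero]
      rw [PySem.Int.floordiv_eq_ediv_of_pos (by omega)]
      omega
    | cons m rest =>
      by_cases hx : (m == x) = true
      · have hmx : m = x := by simpa using hx
        subst hmx
        simp only [gCount, List.takeWhile_cons, hx, if_true, List.dropWhile_cons,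
          beq_self_eq_true, List.length_cons]
        by_cases hc : (c + 1 == 3) = true
        · have hceq : c + 1 = 3 := by simpa using hc
          simp only [hc, if_true]
          have hfd : PySem.Int.floordiv (c + ((rest.takeWhile (· == m)).length + 1 : Nat)) 3
              = 1 + PySem.Int.floordiv ((rest.takeWhile (· == m)).length : Int) 3 := by
            rw [PySem.Int.floordiv_eq_ediv_of_pos (by omega),
              PySem.Int.floordiv_eq_ediv_of_pos (by omega)]
            push_cast
            omega
          rw [hfd]
          -- remaining: gCount rest none 0 splits at the rest of the current run
          have hrest : gCount rest none 0 =
              PySem.Int.floordiv ((rest.takeWhile (· == m)).length : Int) 3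
                + gCount (rest.dropWhile (· == m)) none 0 := by
            cases rest with
            | nil =>
              simp only [gCount, List.takeWhile_nil, List.dropWhile_nil, List.length_nil,
                Nat.cast_zero]
              rw [PySem.Int.floordiv_eq_ediv_of_pos (by omega)]
              omega
            | cons y t =>
              have hnone : (some y == (none : Option Int)) = false := by simp
              by_cases hy : (y == m) = true
              · have hym : y = m := by simpa using hy
                subst hym
                simp only [gCount, hnone, List.takeWhile_cons, hy, if_true,
                  List.dropWhile_cons, List.length_cons, Bool.false_eq_true, if_false]
                have htlen : t.length ≤ n := by
                  simp only [List.length_cons] at hl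
                  omega
                rw [ih t htlen y 1 (by omega) (by omega)]
                have hh : PySem.Int.floordiv ((1:Int) + ((t.takeWhile (· == y)).length : Int)) 3
                    = PySem.Int.floordiv ((((t.takeWhile (· == y)).length + 1 : Nat)) : Int) 3 := by
                  rw [PySem.Int.floordiv_eq_ediv_of_pos (by omega),
                    PySem.Int.floordiv_eq_ediv_of_pos (by omega)]
                  push_cast
                  omega
                rw [hh]
              · simp only [Bool.not_eq_true] at hy
                simp only [gCount, hnone, List.takeWhile_cons, hy, List.dropWhile_cons,
                  List.length_nil, Nat.cast_zero, Bool.false_eq_true, if_false]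
                rw [PySem.Int.floordiv_eq_ediv_of_pos (by omega)]
                omega
          rw [hrest]; ring
        · have hclt : c + 1 < 3 := by
            have : ¬ c + 1 = 3 := by simpa using hc
            omega
          simp only [Bool.not_eq_true] at hc
          simp only [hc, Bool.false_eq_true, if_false]
          rw [ih rest (by simpa using Nat.lt_succ_iff.mp (by simpa using hl)) m (c + 1)
            (by omega) hclt]
          have : (c : Int) + (((rest.takeWhile (· == m)).length + 1 : Nat) : Int)
              = (c + 1) + ((rest.takeWhile (· == m)).length : Int) := by push_cast; ring
          rw [this]
      · simp only [Bool.not_eq_true] at hx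
        have hmb : (some m == some x) = false := by simp [hx]
        simp only [gCount, hmb, List.takeWhile_cons, hx, List.dropWhile_cons, List.length_nil,
          Nat.cast_zero, add_zero, Bool.false_eq_true, if_false]
        have hfd : PySem.Int.floordiv c 3 = 0 := by
          rw [PySem.Int.floordiv_eq_ediv_of_pos (by omega)]; omega
        rw [hfd]
        have hnone : (some m == (none : Option Int)) = false := by simp
        simp only [gCount, hnone, Bool.false_eq_true, if_false]
        omega

-- The uncapped count from the initial state equals B's run-length sum.
theorem gCount_none_eq : ∀ (fuel : Nat) (l : List Int), l.length ≤ fuel →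
    gCount l none 0 = atributoTripleAltCount l := by
  intro fuel
  induction fuel with
  | zero =>
    intro l hl
    have : l = [] := List.length_eq_zero_iff.mp (Nat.le_zero.mp hl)
    subst this
    simp [gCount, atributoTripleAltCount]
  | succ n ih =>
    intro l hl
    cases l with
    | nil => simp [gCount, atributoTripleAltCount]
    | cons x rest =>
      have hnone : (some x == (none : Option Int)) = false := by simp
      simp only [gCount, hnone]
      rw [gCount_run rest.length rest le_rfl x 1 (by omega) (by omega)]
      rw [atributoTripleAltCount]
      have hlen : (rest.dropWhile (· == x)).length ≤ n := by
        have h1 : rest.length ≤ n := by simpa using Nat.lt_succ_iff.mp (by simpa using hl)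
        exact le_trans (List.length_dropWhile_le _ _) h1
      rw [ih (rest.dropWhile (· == x)) hlen]
      have : (1 : Int) + ((rest.takeWhile (· == x)).length : Int)
          = ((1 : Int) + (rest.takeWhile (· == x)).length) := by ring
      push_cast
      ring

-- ===== VERDICT (by name: the statement is the Claim_ definition above) =====
theorem atributoTriple_spec : Claim_equal_atributoTriple := by
  intro lst _
  unfold Spec_atributoTriple atributoTriple atributoTriple_alt
  rw [loop_eq_min lst none 0 0 (by omega) (by omega),
    gCount_none_eq lst.length lst le_rfl]
  have hk0 : 0 ≤ atributoTripleAltCount lst := by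
    rw [← gCount_none_eq lst.length lst le_rfl]
    exact gCount_nonneg lst none 0
  simp only [beq_iff_eq]
  split_ifs <;> first | rfl | omega
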